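-- pv_equiv track=rewrite | github.com/maikaedberg/VI-accuracy | characters.py | chars_in_scenes
-- ===== SOURCE A (Python) =====
-- def chars_in_scenes(scenes, chars):
--     """return a list of actors given a list of tuples of start and end
--     seconds of each scene, so characters[i] gives all the actors
--     that appear between s_e[i][0] and s_e[i][1], according to VI"""
--     res  = []
--     for (s, e) in scenes:
--         characters = []
--         for (c, apperances) in chars.items():
--             for a in apperances:
--                 # if the two tuples (s,e) and (a[0], a[1]) overlap
--                 if(a[1] >= s and a[0] <= e):
--                     characters.append(c)
--                     break
--         res.append(characters)
--     return res
-- ===== SOURCE B (Python) =====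
-- def _bisect_starts(starts, e):
--     lo, hi = 0, len(starts)
--     while lo < hi:
--         mid = (lo + hi) // 2
--         if starts[mid] <= e:
--             lo = mid + 1
--         else:
--             hi = mid
--     return lo
--
-- def chars_in_scenes(scenes, chars):
--     profs = []
--     pid_of = {}
--     charprof = []
--     for (c, apperances) in chars.items():
--         apps = sorted(apperances, key=lambda a: a[0])
--         starts = tuple(a[0] for a in apps)
--         pmax = []
--         m = None
--         for a in apps:
--             m = a[1] if m is None else max(m, a[1])
--             pmax.append(m)
--         key = (starts, tuple(pmax))
--         pid = pid_of.get(key)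
--         if pid is None:
--             pid = len(profs)
--             pid_of[key] = pid
--             profs.append(key)
--         charprof.append((c, pid))
--     cache = {}
--     res = []
--     for (s, e) in scenes:
--         row = cache.get((s, e))
--         if row is None:
--             hits = []
--             for (starts, pmax) in profs:
--                 lo = _bisect_starts(starts, e)
--                 hits.append(lo > 0 and pmax[lo - 1] >= s)
--             row = [c for (c, pid) in charprof if hits[pid]]
--             cache[(s, e)] = row
--         res.append(row)
--     return res
-- ===== Notes on version B (the rewrite author's own statement) =====
-- stated objective: faster
-- what changed: B builds a per-character index once (appearances sorted by start plus a running prefix-max of ends), groups characters that share the same profile so each profile is tested once per scene by binary search over the sorted starts, and memoises whole rows by the (s, e) pair.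
import Mathlib
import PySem

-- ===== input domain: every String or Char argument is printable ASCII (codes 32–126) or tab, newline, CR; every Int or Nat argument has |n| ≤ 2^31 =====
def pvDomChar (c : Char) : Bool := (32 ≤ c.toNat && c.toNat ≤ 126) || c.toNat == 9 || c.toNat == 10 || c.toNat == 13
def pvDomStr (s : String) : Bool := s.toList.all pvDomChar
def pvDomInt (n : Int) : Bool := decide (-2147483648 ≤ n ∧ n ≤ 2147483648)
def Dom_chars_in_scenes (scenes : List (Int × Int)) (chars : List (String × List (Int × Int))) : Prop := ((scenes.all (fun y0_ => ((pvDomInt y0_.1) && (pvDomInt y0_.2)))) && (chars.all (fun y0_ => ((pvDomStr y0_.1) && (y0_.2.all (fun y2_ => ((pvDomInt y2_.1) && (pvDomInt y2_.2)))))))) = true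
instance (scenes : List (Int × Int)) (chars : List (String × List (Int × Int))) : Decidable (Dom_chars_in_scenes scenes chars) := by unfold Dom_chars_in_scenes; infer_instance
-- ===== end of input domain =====

-- B replaces A's per-scene scan of every appearance by a per-character profile
-- (appearances sorted by start with a running prefix-max of ends, deduplicated
-- across characters) queried by binary search once per profile per distinct scene,
-- with whole rows memoised by the (s, e) pair.

-- ===== PORT A =====
-- the inner 'for a in apperances: … break' loop of A
def aHit : List (Int × Int) → Int → Int → Bool
  | [], _, _ => false
  | a :: rest, s, e => if a.2 ≥ s ∧ a.1 ≤ e then true else aHit rest s e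

def chars_in_scenes (scenes : List (Int × Int)) (chars : List (String × List (Int × Int))) : List (List String) :=
  scenes.foldl (fun res se =>
    res ++ [chars.foldl (fun characters ca =>
      if aHit ca.2 se.1 se.2 then characters ++ [ca.1] else characters) []]) []

-- ===== PORT B =====
-- hand-written binary search of Source B ('while lo < hi'); in Python lo, hi stay
-- nonnegative and within [0, len(starts)], so Nat is exact; starts[mid] always has
-- mid < hi ≤ len(starts), so getD with a default is exact (index always in range).
def bsearch (starts : List Int) (e : Int) (lo hi : Nat) : Nat :=
  if h : lo < hi then
    let mid := (lo + hi) / 2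
    if starts.getD mid 0 ≤ e then bsearch starts e (mid + 1) hi
    else bsearch starts e lo mid
  else lo
termination_by hi - lo
decreasing_by all_goals omega

-- the 'm = a[1] if m is None else max(m, a[1]); pmax.append(m)' loop of Source B
def prefMaxGo : Option Int → List (Int × Int) → List Int
  | _, [] => []
  | m, a :: rest =>
    let m' := match m with | none => a.2 | some v => max v a.2
    m' :: prefMaxGo (some m') rest

-- 'apps = sorted(...); starts = [a[0] ...]; pmax loop' of Source B: a character's profile
def profileOf (ca : String × List (Int × Int)) : List Int × List Int :=
  let apps := PySem.List.sorted ca.2 (fun a => a.1) false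
  (apps.map (fun a => a.1), prefMaxGo none apps)

-- one iteration of Source B's chars loop over the state (profs, pid_of, charprof);
-- Python's pid is a nonnegative int (a length), carried as Nat
def buildStep (st : List (List Int × List Int) × PySem.Dict (List Int × List Int) Nat × List (String × Nat))
    (ca : String × List (Int × Int)) :
    List (List Int × List Int) × PySem.Dict (List Int × List Int) Nat × List (String × Nat) :=
  match PySem.Dict.get? st.2.1 (profileOf ca) with
  | some pid => (st.1, st.2.1, st.2.2 ++ [(ca.1, pid)])
  | none => (st.1 ++ [profileOf ca], PySem.Dict.insert st.2.1 (profileOf ca) st.1.length,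
      st.2.2 ++ [(ca.1, st.1.length)])

-- 'hits = []; for (starts, pmax) in profs: … hits.append(…)'
def hitsOf (profs : List (List Int × List Int)) (s e : Int) : List Bool :=
  profs.foldl (fun acc p =>
    let lo := bsearch p.1 e 0 p.1.length
    -- 'lo > 0 and pmax[lo-1] >= s'; lo - 1 < len(pmax) whenever lo > 0, so getD is exact
    acc ++ [decide (0 < lo ∧ p.2.getD (lo - 1) 0 ≥ s)]) []

-- 'row = [c for (c, pid) in charprof if hits[pid]]'; pid < len(hits) always, so getD is exact
def rowOf (profs : List (List Int × List Int)) (charprof : List (String × Nat)) (s e : Int) : List String :=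
  let hits := hitsOf profs s e
  charprof.foldl (fun row cp => if hits.getD cp.2 false then row ++ [cp.1] else row) []

def chars_in_scenes_alt (scenes : List (Int × Int)) (chars : List (String × List (Int × Int))) : List (List String) :=
  let built := chars.foldl buildStep
    (([] : List (List Int × List Int)), (PySem.Dict.empty : PySem.Dict (List Int × List Int) Nat),
      ([] : List (String × Nat)))
  -- 'row = cache.get((s, e)); if row is None: … cache[(s,e)] = row' — the memo loop,
  -- carried as (cache, res); rows are lists, never None, so the None test is the lookup miss
  (scenes.foldl (fun st se =>
    match PySem.Dict.get? st.1 se with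
    | some row => (st.1, st.2 ++ [row])
    | none =>
      let row := rowOf built.1 built.2.2 se.1 se.2
      (PySem.Dict.insert st.1 se row, st.2 ++ [row]))
    ((PySem.Dict.empty : PySem.Dict (Int × Int) (List String)), [])).2

-- ===== PRECONDITION & SPEC =====
def Spec_chars_in_scenes (scenes : List (Int × Int)) (chars : List (String × List (Int × Int))) (out : List (List String)) : Prop := out = chars_in_scenes_alt scenes chars
instance (scenes : List (Int × Int)) (chars : List (String × List (Int × Int))) (out : List (List String)) : Decidable (Spec_chars_in_scenes scenes chars out) := by unfold Spec_chars_in_scenes; infer_instance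

-- ===== CLAIM (what is proved, stated in full; the proofs are below) =====
def Claim_equal_chars_in_scenes : Prop := ∀ (scenes : List (Int × Int)) (chars : List (String × List (Int × Int))), Dom_chars_in_scenes scenes chars → Spec_chars_in_scenes scenes chars (chars_in_scenes scenes chars)

-- ===== LEMMAS AND PROOFS =====

-- A's break loop is an existence test
theorem aHit_iff (apps : List (Int × Int)) (s e : Int) :
    aHit apps s e = true ↔ ∃ a ∈ apps, a.2 ≥ s ∧ a.1 ≤ e := by
  induction apps with
  | nil => simp [aHit]
  | cons a rest ih =>
    simp only [aHit]
    split_ifs with h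
    · simp [h]
    · simp [ih, h]

theorem sorted_getD_mono (starts : List Int) (hsort : starts.Pairwise (· ≤ ·))
    {i j : Nat} (hij : i ≤ j) (hj : j < starts.length) :
    starts.getD i 0 ≤ starts.getD j 0 := by
  rcases Nat.lt_or_eq_of_le hij with h | h
  · rw [List.getD_eq_getElem _ _ (lt_of_le_of_lt hij hj), List.getD_eq_getElem _ _ hj]
    exact List.pairwise_iff_getElem.mp hsort i j _ hj h
  · subst h; rfl

-- binary-search characterisation on a sorted list
theorem bsearch_char (starts : List Int) (e : Int)
    (hsort : starts.Pairwise (· ≤ ·)) :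
    ∀ lo hi : Nat, hi ≤ starts.length → lo ≤ hi →
    (∀ i, i < lo → starts.getD i 0 ≤ e) →
    (∀ i, hi ≤ i → i < starts.length → e < starts.getD i 0) →
    bsearch starts e lo hi ≤ starts.length ∧
      ∀ i, i < starts.length → (i < bsearch starts e lo hi ↔ starts.getD i 0 ≤ e) := by
  intro lo hi
  fun_induction bsearch starts e lo hi with
  | case1 lo hi h mid hle ih =>
    intro hhi hlh hbelow habove
    apply ih
    · exact hhi
    · omega
    · intro i hi'
      have hmid : mid < starts.length := by omega
      exact le_trans (sorted_getD_mono starts hsort (by omega) hmid) hle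
    · exact habove
  | case2 lo hi h mid hgt ih =>
    intro hhi hlh hbelow habove
    apply ih
    · omega
    · omega
    · exact hbelow
    · intro i hmi hil
      have hmid : mid < starts.length := by omega
      exact lt_of_lt_of_le (not_le.mp hgt) (sorted_getD_mono starts hsort hmi hil)
  | case3 lo hi h =>
    intro hhi hlh hbelow habove
    refine ⟨by omega, fun i hi' => ⟨fun hlt => hbelow i hlt, fun hle => ?_⟩⟩
    by_contra hge
    exact absurd hle (not_le.mpr (habove i (by omega) hi'))

-- prefix-max characterisation (m = the running max so far; none = not started)
theorem prefMax_char (s : Int) :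
    ∀ (apps : List (Int × Int)) (m : Option Int) (i : Nat), i < apps.length →
    (s ≤ (prefMaxGo m apps).getD i 0 ↔
      (∃ v, m = some v ∧ s ≤ v) ∨ ∃ j, ∃ _ : j < apps.length, j ≤ i ∧ s ≤ apps[j].2) := by
  intro apps
  induction apps with
  | nil => intro m i hi; simp at hi
  | cons a rest ih =>
    intro m i hi
    have hm' : ∀ w : Int,
        (s ≤ (match m with | none => a.2 | some v => max v a.2)) ↔
          ((∃ v, m = some v ∧ s ≤ v) ∨ s ≤ a.2) := by
      intro _
      cases m with
      | none => simp
      | some v => simp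
    cases i with
    | zero =>
      simp only [prefMaxGo, List.getD_cons_zero]
      rw [hm' 0]
      constructor
      · rintro (h | h)
        · exact Or.inl h
        · exact Or.inr ⟨0, by simp, by simp, by simpa using h⟩
      · rintro (h | ⟨j, hj, hj0, hs⟩)
        · exact Or.inl h
        · interval_cases j
          exact Or.inr (by simpa using hs)
    | succ k =>
      have hk : k < rest.length := by simpa using hi
      simp only [prefMaxGo, List.getD_cons_succ]
      rw [ih _ k hk]
      constructor
      · rintro (⟨v, hv, hs⟩ | ⟨j, hj, hjk, hs⟩)
        · rw [Option.some.injEq] at hv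
          rw [← hv] at hs
          rcases (hm' 0).mp hs with h | h
          · exact Or.inl h
          · exact Or.inr ⟨0, by simp, by omega, by simpa using h⟩
        · exact Or.inr ⟨j + 1, by simpa using hj, by omega, by simpa using hs⟩
      · rintro (h | ⟨j, hj, hjk, hs⟩)
        · exact Or.inl ⟨_, rfl, (hm' 0).mpr (Or.inl h)⟩
        · cases j with
          | zero => exact Or.inl ⟨_, rfl, (hm' 0).mpr (Or.inr (by simpa using hs))⟩
          | succ j' =>
            exact Or.inr ⟨j', by simpa using hj, by omega, by simpa using hs⟩

-- per character: A's linear scan equals B's indexed query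
theorem hit_eq (apps : List (Int × Int)) (s e : Int) :
    aHit apps s e =
      decide (0 < bsearch ((PySem.List.sorted apps (fun a => a.1) false).map (fun a => a.1)) e 0
            ((PySem.List.sorted apps (fun a => a.1) false).map (fun a => a.1)).length ∧
          (prefMaxGo none (PySem.List.sorted apps (fun a => a.1) false)).getD
            (bsearch ((PySem.List.sorted apps (fun a => a.1) false).map (fun a => a.1)) e 0
              ((PySem.List.sorted apps (fun a => a.1) false).map (fun a => a.1)).length - 1) 0 ≥ s) := by
  set apps' := PySem.List.sorted apps (fun a => a.1) false with happs'
  set starts := apps'.map (fun a => a.1) with hstarts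
  have hlen : starts.length = apps'.length := by simp [hstarts]
  have hsort : starts.Pairwise (· ≤ ·) := by
    rw [hstarts, List.pairwise_map]
    exact PySem.List.sorted_pairwise apps (fun a => a.1)
  obtain ⟨hr, hiff⟩ := bsearch_char starts e hsort 0 starts.length le_rfl (Nat.zero_le _)
    (by omega) (by omega)
  set r := bsearch starts e 0 starts.length with hrdef
  rw [Bool.eq_iff_iff, decide_eq_true_eq, aHit_iff]
  have hmem : ∀ a, a ∈ apps ↔ a ∈ apps' := by
    intro a; rw [happs', PySem.List.mem_sorted]
  have hgd : ∀ j (hj : j < apps'.length), starts.getD j 0 = apps'[j].1 := by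
    intro j hj
    rw [List.getD_eq_getElem _ _ (by omega)]
    simp [hstarts]
  constructor
  · rintro ⟨a, ha, hs2, h1e⟩
    rw [hmem] at ha
    obtain ⟨j, hj, rfl⟩ := List.mem_iff_getElem.mp ha
    have hjr : j < r := (hiff j (by omega)).mpr (by rw [hgd j hj]; exact h1e)
    have hrpos : 0 < r := by omega
    refine ⟨hrpos, ?_⟩
    rw [ge_iff_le, prefMax_char s apps' none (r - 1) (by omega)]
    exact Or.inr ⟨j, hj, by omega, hs2⟩
  · rintro ⟨hrpos, hs⟩
    rw [ge_iff_le, prefMax_char s apps' none (r - 1) (by omega)] at hs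
    rcases hs with ⟨v, hv, _⟩ | ⟨j, hj, hjr, hs2⟩
    · exact absurd hv (by simp)
    · have h1e : apps'[j].1 ≤ e := by
        rw [← hgd j hj]
        exact (hiff j (by omega)).mp (by omega)
      exact ⟨apps'[j], (hmem _).mpr (List.getElem_mem hj), hs2, h1e⟩

-- the memoising fold over scenes produces one row per scene, computed by f
theorem memo_fold (f : (Int × Int) → List String) :
    ∀ (scenes : List (Int × Int)) (cache : PySem.Dict (Int × Int) (List String))
      (res : List (List String)),
    (∀ k v, cache.get? k = some v → v = f k) →
    (scenes.foldl (fun st se =>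
      match PySem.Dict.get? st.1 se with
      | some row => (st.1, st.2 ++ [row])
      | none => (PySem.Dict.insert st.1 se (f se), st.2 ++ [f se])) (cache, res)).2
      = res ++ scenes.map f := by
  intro scenes
  induction scenes with
  | nil => intro cache res _; simp
  | cons se rest ih =>
    intro cache res hinv
    simp only [List.foldl_cons, List.map_cons]
    cases hget : PySem.Dict.get? cache se with
    | some row =>
      rw [ih cache (res ++ [row]) hinv, hinv se row hget]
      simp
    | none =>
      rw [ih _ (res ++ [f se]) ?_]
      · simp
      · intro k v hk
        rw [PySem.Dict.get?_insert] at hk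
        by_cases hke : k = se
        · subst hke; simp at hk; exact hk.symm
        · rw [if_neg hke] at hk; exact hinv k v hk

-- a charprof entry is the character's name with a pid pointing at its profile
def PRel (profs : List (List Int × List Int)) (cp : String × Nat) (ca : String × List (Int × Int)) : Prop :=
  cp.1 = ca.1 ∧ ∃ _ : cp.2 < profs.length, profs[cp.2] = profileOf ca

theorem forall2_snoc {α β : Type} {R : α → β → Prop} {l₁ : List α} {l₂ : List β} {x : α} {y : β}
    (h : List.Forall₂ R l₁ l₂) (hx : R x y) : List.Forall₂ R (l₁ ++ [x]) (l₂ ++ [y]) := by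
  induction h with
  | nil => simpa using List.forall₂_cons.mpr ⟨hx, List.Forall₂.nil⟩
  | cons hh _ ih => simp only [List.cons_append]; exact List.forall₂_cons.mpr ⟨hh, ih⟩

theorem PRel_mono (profs ext : List (List Int × List Int)) (cp : String × Nat)
    (ca : String × List (Int × Int)) (h : PRel profs cp ca) : PRel (profs ++ ext) cp ca := by
  obtain ⟨h1, h2, h3⟩ := h
  exact ⟨h1, by simp; omega, by rw [List.getElem_append_left h2]; exact h3⟩

-- Source B's chars loop: every charprof entry points at that character's profile in profs
theorem build_char :
    ∀ (chars : List (String × List (Int × Int)))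
      (profs : List (List Int × List Int)) (pid_of : PySem.Dict (List Int × List Int) Nat)
      (charprof : List (String × Nat)) (prior : List (String × List (Int × Int))),
    (∀ key pid, pid_of.get? key = some pid → ∃ _ : pid < profs.length, profs[pid] = key) →
    List.Forall₂ (PRel profs) charprof prior →
    ∃ ext,
      (chars.foldl buildStep (profs, pid_of, charprof)).1 = profs ++ ext ∧
      List.Forall₂ (PRel (chars.foldl buildStep (profs, pid_of, charprof)).1)
        (chars.foldl buildStep (profs, pid_of, charprof)).2.2 (prior ++ chars) := by
  intro chars
  induction chars with
  | nil =>
    intro profs pid_of charprof prior _ hF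
    exact ⟨[], by simp, by simpa using hF⟩
  | cons ca rest ih =>
    intro profs pid_of charprof prior hinv hF
    simp only [List.foldl_cons, buildStep]
    cases hget : PySem.Dict.get? pid_of (profileOf ca) with
    | some pid =>
      obtain ⟨hlt, hkey⟩ := hinv _ _ hget
      obtain ⟨ext, h1, h2⟩ := ih profs pid_of (charprof ++ [(ca.1, pid)]) (prior ++ [ca]) hinv
        (forall2_snoc hF ⟨rfl, hlt, hkey⟩)
      refine ⟨ext, h1, ?_⟩
      rw [List.append_assoc] at h2
      simpa using h2
    | none =>
      have hinv' : ∀ key pid, (PySem.Dict.insert pid_of (profileOf ca) profs.length).get? key = some pid →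
          ∃ _ : pid < (profs ++ [profileOf ca]).length, (profs ++ [profileOf ca])[pid] = key := by
        intro key pid hp
        rw [PySem.Dict.get?_insert] at hp
        by_cases hke : key = profileOf ca
        · rw [if_pos hke] at hp
          have hpid : pid = profs.length := (Option.some.inj hp).symm
          subst hpid
          exact ⟨by simp, by simp [hke.symm]⟩
        · rw [if_neg hke] at hp
          obtain ⟨h, hk⟩ := hinv _ _ hp
          exact ⟨by simp; omega, by rw [List.getElem_append_left h]; exact hk⟩
      have hF' : List.Forall₂ (PRel (profs ++ [profileOf ca]))
          (charprof ++ [(ca.1, profs.length)]) (prior ++ [ca]) := by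
        exact forall2_snoc (hF.imp (fun {a b} h => PRel_mono _ _ _ _ h))
          ⟨rfl, by simp, by simp⟩
      obtain ⟨ext, h1, h2⟩ := ih (profs ++ [profileOf ca]) _ _ _ hinv' hF'
      refine ⟨[profileOf ca] ++ ext, by rw [h1, List.append_assoc], ?_⟩
      rw [List.append_assoc] at h2
      simpa using h2

theorem hitsOf_getD (profs : List (List Int × List Int)) (s e : Int) (pid : Nat)
    (h : pid < profs.length) :
    (hitsOf profs s e).getD pid false =
      decide (0 < bsearch profs[pid].1 e 0 profs[pid].1.length ∧
        profs[pid].2.getD (bsearch profs[pid].1 e 0 profs[pid].1.length - 1) 0 ≥ s) := by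
  unfold hitsOf
  rw [PySem.List.foldl_append_singleton_eq_map, List.nil_append,
    List.getD_eq_getElem _ _ (by simpa), List.getElem_map]

-- per character: A's scan equals the profile's indexed test
theorem hit_profile (ca : String × List (Int × Int)) (s e : Int) :
    aHit ca.2 s e = decide (0 < bsearch (profileOf ca).1 e 0 (profileOf ca).1.length ∧
      (profileOf ca).2.getD (bsearch (profileOf ca).1 e 0 (profileOf ca).1.length - 1) 0 ≥ s) := by
  simp only [profileOf]
  exact hit_eq ca.2 s e

-- B's row over (profs, charprof) is A's row over chars
theorem row_eq (profs : List (List Int × List Int)) :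
    ∀ (charprof : List (String × Nat)) (chars : List (String × List (Int × Int))),
    List.Forall₂ (PRel profs) charprof chars → ∀ (s e : Int) (acc : List String),
    charprof.foldl (fun row cp => if (hitsOf profs s e).getD cp.2 false then row ++ [cp.1] else row) acc
      = chars.foldl (fun row ca => if aHit ca.2 s e then row ++ [ca.1] else row) acc := by
  intro charprof chars hF
  induction hF with
  | nil => intro s e acc; rfl
  | @cons cp ca cptail catail hrel htail ih =>
    intro s e acc
    obtain ⟨h1, h2, h3⟩ := hrel
    simp only [List.foldl_cons]
    rw [hitsOf_getD profs s e cp.2 h2, h3, ← hit_profile, h1, ih]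

-- ===== VERDICT (by name: the statement is the Claim_ definition above) =====
theorem chars_in_scenes_spec : Claim_equal_chars_in_scenes := by
  intro scenes chars _
  unfold Spec_chars_in_scenes
  simp only [chars_in_scenes, chars_in_scenes_alt]
  obtain ⟨ext, hprofs, hF⟩ := build_char chars [] PySem.Dict.empty [] []
    (by intro k p h; rw [PySem.Dict.get?_empty] at h; cases h) List.Forall₂.nil
  rw [memo_fold (fun se => rowOf (chars.foldl buildStep ([], PySem.Dict.empty, [])).1
      (chars.foldl buildStep ([], PySem.Dict.empty, [])).2.2 se.1 se.2) scenes PySem.Dict.empty []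
    (by intro k v hk; rw [PySem.Dict.get?_empty] at hk; cases hk)]
  rw [PySem.List.foldl_append_singleton_eq_map, List.nil_append]
  apply List.map_congr_left
  intro se _
  exact (row_eq _ _ _ (by simpa using hF) se.1 se.2 []).symm
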